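-- pv_equiv track=rewrite | github.com/FredHutch/sagemaker-infosec | lib/security_integrations/ai_agent.py | _basic_prioritization
-- ===== SOURCE A (Python) =====
-- from typing import Any, Dict, List, Optional
--
-- def _basic_prioritization(incidents: List[Dict]) -> Dict:
--     """Basic prioritization if AI is unavailable"""
--     high_severity = ['Critical', 'High', 'critical', 'high']
--     medium_severity = ['Medium', 'medium']
--
--     return {
--         'high_priority': [inc for inc in incidents if inc.get('severity') in high_severity],
--         'medium_priority': [inc for inc in incidents if inc.get('severity') in medium_severity],
--         'low_priority': [inc for inc in incidents if inc.get('severity') not in high_severity + medium_severity],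
--         'campaigns': []
--     }
-- ===== SOURCE B (Python) =====
-- def _basic_prioritization(incidents):
--     """Basic prioritization if AI is unavailable"""
--     high, medium, low = [], [], []
--     for inc in incidents:
--         sev = inc.get('severity')
--         if sev in ('Critical', 'High', 'critical', 'high'):
--             high.append(inc)
--         elif sev in ('Medium', 'medium'):
--             medium.append(inc)
--         else:
--             low.append(inc)
--     return {
--         'high_priority': high,
--         'medium_priority': medium,
--         'low_priority': low,
--         'campaigns': []
--     }
-- ===== Notes on version B (the rewrite author's own statement) =====
-- stated objective: simpler
-- what changed: Replaced the three separate list comprehensions (three passes over incidents) with one loop that classifies each incident once into high/medium/low accumulators.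
import Mathlib
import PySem

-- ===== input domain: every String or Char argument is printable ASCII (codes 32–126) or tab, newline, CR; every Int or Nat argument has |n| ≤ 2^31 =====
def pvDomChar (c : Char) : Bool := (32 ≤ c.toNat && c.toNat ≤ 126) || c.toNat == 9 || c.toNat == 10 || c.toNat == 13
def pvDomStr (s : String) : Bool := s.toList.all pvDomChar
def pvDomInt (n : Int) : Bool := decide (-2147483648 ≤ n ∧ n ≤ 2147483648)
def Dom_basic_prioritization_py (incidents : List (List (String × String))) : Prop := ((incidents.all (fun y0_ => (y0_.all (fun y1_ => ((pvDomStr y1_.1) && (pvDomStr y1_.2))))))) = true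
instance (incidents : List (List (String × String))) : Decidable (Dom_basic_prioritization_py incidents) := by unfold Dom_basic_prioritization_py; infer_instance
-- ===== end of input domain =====

-- B replaces A's three list comprehensions (three passes) by one classifying loop; same return value.

-- ===== PORT A =====
-- inc.get('severity'): first-match lookup in the association list, None if absent
def pvGetSev (inc : List (String × String)) : Option String :=
  match inc with
  | [] => none
  | (k, v) :: rest => if k == "severity" then some v else pvGetSev rest

-- 'sev in lst' where sev : Option String (None is in no list of strings)
def pvOptMem (o : Option String) (l : List String) : Bool :=
  match o with
  | some s => l.contains s
  | none => false

def pvHighSeverity : List String := ["Critical", "High", "critical", "high"]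
def pvMediumSeverity : List String := ["Medium", "medium"]

def basic_prioritization_py (incidents : List (List (String × String))) : List (String × List (List (String × String))) :=
  [ ("high_priority", incidents.filter (fun inc => pvOptMem (pvGetSev inc) pvHighSeverity)),
    ("medium_priority", incidents.filter (fun inc => pvOptMem (pvGetSev inc) pvMediumSeverity)),
    ("low_priority", incidents.filter (fun inc => !pvOptMem (pvGetSev inc) (pvHighSeverity ++ pvMediumSeverity))),
    ("campaigns", []) ]

-- ===== PORT B =====
-- the loop of Source B: one pass, three accumulators, appended in order
def pvAltLoop (incidents : List (List (String × String)))
    (high medium low : List (List (String × String))) :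
    List (List (String × String)) × List (List (String × String)) × List (List (String × String)) :=
  match incidents with
  | [] => (high, medium, low)
  | inc :: rest =>
      let sev := pvGetSev inc
      if pvOptMem sev ["Critical", "High", "critical", "high"] then
        pvAltLoop rest (high ++ [inc]) medium low
      else if pvOptMem sev ["Medium", "medium"] then
        pvAltLoop rest high (medium ++ [inc]) low
      else
        pvAltLoop rest high medium (low ++ [inc])

def basic_prioritization_py_alt (incidents : List (List (String × String))) : List (String × List (List (String × String))) :=
  let r := pvAltLoop incidents [] [] []
  [ ("high_priority", r.1), ("medium_priority", r.2.1), ("low_priority", r.2.2), ("campaigns", []) ]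

-- ===== PRECONDITION & SPEC =====
def Spec_basic_prioritization_py (incidents : List (List (String × String))) (out : List (String × List (List (String × String)))) : Prop := out = basic_prioritization_py_alt incidents
instance (incidents : List (List (String × String))) (out : List (String × List (List (String × String)))) : Decidable (Spec_basic_prioritization_py incidents out) := by unfold Spec_basic_prioritization_py; infer_instance

-- ===== CLAIM (what is proved, stated in full; the proofs are below) =====
def Claim_equal_basic_prioritization_py : Prop := ∀ (incidents : List (List (String × String))), Dom_basic_prioritization_py incidents → Spec_basic_prioritization_py incidents (basic_prioritization_py incidents)

-- ===== LEMMAS AND PROOFS =====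

theorem pvHigh_not_med (o : Option String) (h : pvOptMem o pvHighSeverity = true) :
    pvOptMem o pvMediumSeverity = false := by
  cases o with
  | none => exact absurd h (by decide)
  | some s =>
      have h' : s = "Critical" ∨ s = "High" ∨ s = "critical" ∨ s = "high" := by
        simpa [pvHighSeverity] using (List.contains_iff_mem.mp h)
      rcases h' with rfl | rfl | rfl | rfl <;> decide

theorem pvOptMem_append (o : Option String) (l₁ l₂ : List String) :
    pvOptMem o (l₁ ++ l₂) = (pvOptMem o l₁ || pvOptMem o l₂) := by
  cases o <;> simp [pvOptMem]

-- the loop invariant: pvAltLoop extends its accumulators by the three filters of A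
theorem pvAltLoop_eq (incidents : List (List (String × String)))
    (high medium low : List (List (String × String))) :
    pvAltLoop incidents high medium low =
      (high ++ incidents.filter (fun inc => pvOptMem (pvGetSev inc) pvHighSeverity),
       medium ++ incidents.filter (fun inc => pvOptMem (pvGetSev inc) pvMediumSeverity),
       low ++ incidents.filter (fun inc => !pvOptMem (pvGetSev inc) (pvHighSeverity ++ pvMediumSeverity))) := by
  induction incidents generalizing high medium low with
  | nil => simp [pvAltLoop]
  | cons inc rest ih =>
      have hH : pvOptMem (pvGetSev inc) ["Critical", "High", "critical", "high"]
          = pvOptMem (pvGetSev inc) pvHighSeverity := rfl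
      have hM : pvOptMem (pvGetSev inc) ["Medium", "medium"]
          = pvOptMem (pvGetSev inc) pvMediumSeverity := rfl
      rw [pvAltLoop, hH, hM]
      by_cases h1 : pvOptMem (pvGetSev inc) pvHighSeverity = true
      · have hm := pvHigh_not_med _ h1
        simp [h1, hm, ih, pvOptMem_append]
      · have h1' : pvOptMem (pvGetSev inc) pvHighSeverity = false := by
          simpa using h1
        by_cases h2 : pvOptMem (pvGetSev inc) pvMediumSeverity = true
        · simp [h1', h2, ih, pvOptMem_append]
        · have h2' : pvOptMem (pvGetSev inc) pvMediumSeverity = false := by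
            simpa using h2
          simp [h1', h2', ih, pvOptMem_append]

-- ===== VERDICT (by name: the statement is the Claim_ definition above) =====
theorem basic_prioritization_py_spec : Claim_equal_basic_prioritization_py := by
  intro incidents _
  unfold Spec_basic_prioritization_py basic_prioritization_py basic_prioritization_py_alt
  rw [pvAltLoop_eq]
  simp
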